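-- pv_equiv track=rewrite | github.com/leonlang/description_generator | video.py | create_en_description
-- ===== SOURCE A (Python) =====
-- def create_en_description(read_csv,html_titles,html_links):
--     description = "Find the best Deal for "
--
--     for csv_row in read_csv:
--         csv_number_str = csv_row[0]
--         if csv_number_str.isdigit():
--             csv_number = int(csv_number_str) - 1
--             if len(html_links[csv_number]) > 0:
--                 description += html_titles[csv_number] + '\n'
--                 first_amazon_link = False
--                 second_amazon_link = False
--                 for affiliate_link in html_links[csv_number]:
--                     if affiliate_link.startswith("Amazon") and first_amazon_link == True:
--                         second_amazon_link = True
--                     if affiliate_link.startswith("Amazon"):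
--                         first_amazon_link = True
--                     if first_amazon_link == True and second_amazon_link == True:
--                         description += affiliate_link + '\n'
--                 description += '\n'
--     return description
-- ===== SOURCE B (Python) =====
-- def create_en_description(read_csv, html_titles, html_links):
--     def find_amazon(seq):
--         for k, link in enumerate(seq):
--             if link.startswith("Amazon"):
--                 return k
--         return None
--
--     def block(csv_row):
--         s = csv_row[0]
--         if not s.isdigit():
--             return ""
--         i = int(s) - 1
--         links = html_links[i]
--         if not links:
--             return ""
--         parts = [html_titles[i], "\n"]
--         first = find_amazon(links)
--         if first is not None:
--             rest = links[first + 1:]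
--             second = find_amazon(rest)
--             if second is not None:
--                 for link in rest[second:]:
--                     parts.append(link + "\n")
--         parts.append("\n")
--         return "".join(parts)
--
--     return "Find the best Deal for " + "".join(block(row) for row in read_csv)
-- ===== Notes on version B (the rewrite author's own statement) =====
-- stated objective: simpler
-- what changed: A's single mutable description string with a two-boolean (first/second Amazon flag) state machine is replaced by mapping each CSV row to an independent block string (title, then the links from the second Amazon occurrence found by two successive index scans, then a blank line) and joining the blocks.
import Mathlib
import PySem

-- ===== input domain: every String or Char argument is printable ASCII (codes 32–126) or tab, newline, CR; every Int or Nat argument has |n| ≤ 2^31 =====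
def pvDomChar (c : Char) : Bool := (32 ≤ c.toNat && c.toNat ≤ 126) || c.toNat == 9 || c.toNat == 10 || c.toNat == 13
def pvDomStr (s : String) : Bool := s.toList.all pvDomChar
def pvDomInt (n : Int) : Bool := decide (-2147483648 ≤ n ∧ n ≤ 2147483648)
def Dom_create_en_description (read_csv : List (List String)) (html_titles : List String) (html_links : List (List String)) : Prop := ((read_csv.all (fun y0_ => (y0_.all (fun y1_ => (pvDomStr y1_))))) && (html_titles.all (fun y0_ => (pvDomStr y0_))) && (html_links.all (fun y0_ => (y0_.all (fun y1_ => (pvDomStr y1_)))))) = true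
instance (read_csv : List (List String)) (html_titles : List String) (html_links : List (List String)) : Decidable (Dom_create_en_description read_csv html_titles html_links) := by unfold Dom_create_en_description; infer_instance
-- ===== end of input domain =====

-- B replaces A's single accumulated string with a two-flag state machine by mapping each CSV row
-- to an independent block string (title, links from the second Amazon occurrence found by two
-- successive index scans, blank line) and joining the blocks (simpler decomposition).

-- ===== PORT A =====

-- A's inner loop: state (first_amazon_link, second_amazon_link, description), branches in A's order.
def pvALoop (links : List String) (d : String) : String :=
  (links.foldl (fun (st : Bool × Bool × String) l =>
      let s2 := if PySem.Str.startswith l "Amazon" && st.1 then true else st.2.1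
      let f2 := if PySem.Str.startswith l "Amazon" then true else st.1
      let d2 := if f2 && s2 then st.2.2 ++ l ++ "\n" else st.2.2
      (f2, s2, d2)) (false, false, d)).2.2

-- Option-valued accumulator: `none` marks the point where the Python raises (IndexError); Pre_ excludes it.
def create_en_description (read_csv : List (List String)) (html_titles : List String) (html_links : List (List String)) : String :=
  (read_csv.foldl (fun (acc : Option String) csv_row =>
    match acc with
    | none => none
    | some d =>
      match PySem.List.pyGet? csv_row 0 with
      | none => none
      | some csv_number_str =>
        if PySem.Str.strIsdigit csv_number_str then
          match PySem.Int.ofStr? csv_number_str with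
          | none => none
          | some n =>
            match PySem.List.pyGet? html_links (n - 1) with
            | none => none
            | some links =>
              if links.length > 0 then
                match PySem.List.pyGet? html_titles (n - 1) with
                | none => none
                | some title => some (pvALoop links (d ++ title ++ "\n") ++ "\n")
              else some d
        else some d) (some "Find the best Deal for ")).getD ""

-- ===== PORT B =====

-- Source B's find_amazon: index of the first "Amazon"-prefixed element, None if there is none.
def pvFindAmazon : List String → Option Nat
  | [] => none
  | l :: ls =>
    if PySem.Str.startswith l "Amazon" then some 0
    else (pvFindAmazon ls).map (· + 1)

-- Source B's block(csv_row); `none` where the Python raises (IndexError), which Pre_ excludes.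
def pvBlock (html_titles : List String) (html_links : List (List String))
    (csv_row : List String) : Option String :=
  match PySem.List.pyGet? csv_row 0 with
  | none => none
  | some s =>
    if PySem.Str.strIsdigit s then
      match PySem.Int.ofStr? s with
      | none => none
      | some n =>
        match PySem.List.pyGet? html_links (n - 1) with
        | none => none
        | some links =>
          if links = [] then some ""
          else
            match PySem.List.pyGet? html_titles (n - 1) with
            | none => none
            | some title =>
              let tail :=
                match pvFindAmazon links with
                | none => []
                | some first =>
                  let rest := PySem.List.slice links (some ((first : Int) + 1)) none
                  match pvFindAmazon rest with
                  | none => []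
                  | some second => PySem.List.slice rest (some (second : Int)) none
              some (String.join ([title, "\n"] ++ tail.map (· ++ "\n") ++ ["\n"]))
    else some ""

def create_en_description_alt (read_csv : List (List String)) (html_titles : List String) (html_links : List (List String)) : String :=
  "Find the best Deal for " ++
    String.join (read_csv.map (fun row => (pvBlock html_titles html_links row).getD ""))

-- ===== PRECONDITION & SPEC =====
-- Pre_ = exactly the inputs on which Python A returns: every row nonempty (csv_row[0]), and for each
-- digit-string row int(row[0]) parses and the index int(row[0])-1 is a valid Python index into
-- html_links and, when that link list is nonempty, also into html_titles (else A raises IndexError).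
def Pre_create_en_description (read_csv : List (List String)) (html_titles : List String) (html_links : List (List String)) : Prop :=
  ∀ csv_row ∈ read_csv, csv_row ≠ [] ∧
    (PySem.Str.strIsdigit (csv_row.headD "") = true →
      (PySem.Int.ofStr? (csv_row.headD "")).isSome = true ∧
      PySem.Raise.InRange html_links.length ((PySem.Int.ofStr? (csv_row.headD "")).getD 0 - 1) ∧
      (PySem.List.pyGetD html_links ((PySem.Int.ofStr? (csv_row.headD "")).getD 0 - 1) [] ≠ [] →
        PySem.Raise.InRange html_titles.length ((PySem.Int.ofStr? (csv_row.headD "")).getD 0 - 1)))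
instance (read_csv : List (List String)) (html_titles : List String) (html_links : List (List String)) : Decidable (Pre_create_en_description read_csv html_titles html_links) := by unfold Pre_create_en_description; infer_instance

def pvWitness_create_en_description : List (List String) × List String × List (List String) :=
  ([["1"], ["2"], ["x"]], ["T1", "T2"], [["Amazon a", "Ebay", "Amazon b", "c"], ["d"]])

def Spec_create_en_description (read_csv : List (List String)) (html_titles : List String) (html_links : List (List String)) (out : String) : Prop := out = create_en_description_alt read_csv html_titles html_links
instance (read_csv : List (List String)) (html_titles : List String) (html_links : List (List String)) (out : String) : Decidable (Spec_create_en_description read_csv html_titles html_links out) := by unfold Spec_create_en_description; infer_instance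

-- ===== CLAIM (what is proved, stated in full; the proofs are below) =====
def Claim_equal_create_en_description : Prop := ∀ (read_csv : List (List String)) (html_titles : List String) (html_links : List (List String)), Dom_create_en_description read_csv html_titles html_links → Pre_create_en_description read_csv html_titles html_links → Spec_create_en_description read_csv html_titles html_links (create_en_description read_csv html_titles html_links)

-- ===== LEMMAS AND PROOFS =====

def pvAStep (st : Bool × Bool × String) (l : String) : Bool × Bool × String :=
  let s2 := if PySem.Str.startswith l "Amazon" && st.1 then true else st.2.1
  let f2 := if PySem.Str.startswith l "Amazon" then true else st.1
  let d2 := if f2 && s2 then st.2.2 ++ l ++ "\n" else st.2.2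
  (f2, s2, d2)

lemma pvAStep_eq (f s : Bool) (d l : String) :
    pvAStep (f, s, d) l =
      (PySem.Str.startswith l "Amazon" || f,
       (PySem.Str.startswith l "Amazon" && f) || s,
       if (PySem.Str.startswith l "Amazon" || f) && ((PySem.Str.startswith l "Amazon" && f) || s)
         then d ++ l ++ "\n" else d) := by
  cases haz : PySem.Str.startswith l "Amazon" <;> cases f <;> cases s <;>
    simp only [pvAStep, haz] <;> rfl

def pvF (d : String) (ls : List String) : String :=
  ls.foldl (fun d l => d ++ l ++ "\n") d

lemma pvJoinAux (xs : List String) (s : String) :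
    xs.foldl (· ++ ·) s = s ++ String.join xs := by
  induction xs generalizing s with
  | nil => simp [String.join]
  | cons x t ih =>
    simp only [String.join, List.foldl_cons] at *
    rw [ih (s ++ x), ih ("" ++ x)]
    simp [String.append_assoc]

lemma pvJoin_cons (a : String) (l : List String) :
    String.join (a :: l) = a ++ String.join l := by
  rw [show String.join (a :: l) = List.foldl (· ++ ·) ("" ++ a) l from rfl, pvJoinAux]
  simp

lemma pvJoin_append (xs ys : List String) :
    String.join (xs ++ ys) = String.join xs ++ String.join ys := by
  induction xs with
  | nil => simp [String.join]
  | cons x t ih => simp [pvJoin_cons, ih, String.append_assoc]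

lemma pvALoop_tt (links : List String) (d : String) :
    (links.foldl pvAStep (true, true, d)).2.2 = pvF d links := by
  induction links generalizing d with
  | nil => rfl
  | cons l ls ih =>
    simp only [List.foldl_cons, pvAStep_eq, Bool.or_true, Bool.and_true,
      Bool.and_self, if_true]
    rw [ih]
    rfl

lemma pvALoop_tf (links : List String) (d : String) :
    (links.foldl pvAStep (true, false, d)).2.2 =
      match pvFindAmazon links with
      | some j => pvF d (links.drop j)
      | none => d := by
  induction links generalizing d with
  | nil => rfl
  | cons l ls ih =>
    cases haz : PySem.Str.startswith l "Amazon" with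
    | true =>
      simp only [List.foldl_cons, pvAStep_eq, haz, Bool.true_or, Bool.or_false,
        Bool.and_self, if_true]
      rw [pvALoop_tt]
      simp only [pvFindAmazon, haz, if_true, List.drop_zero]
      rfl
    | false =>
      simp only [List.foldl_cons, pvAStep_eq, haz, Bool.false_or, Bool.false_and, Bool.and_false,
        Bool.false_eq_true, if_false]
      rw [ih]
      simp only [pvFindAmazon, haz, Bool.false_eq_true, if_false]
      cases hp : pvFindAmazon ls with
      | none => rfl
      | some j => simp [List.drop_succ_cons]

lemma pvALoop_ff (links : List String) (d : String) :
    (links.foldl pvAStep (false, false, d)).2.2 =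
      match pvFindAmazon links with
      | none => d
      | some k =>
        match pvFindAmazon (links.drop (k + 1)) with
        | none => d
        | some j => pvF d ((links.drop (k + 1)).drop j) := by
  induction links generalizing d with
  | nil => rfl
  | cons l ls ih =>
    cases haz : PySem.Str.startswith l "Amazon" with
    | true =>
      simp only [List.foldl_cons, pvAStep_eq, haz, Bool.and_false, Bool.or_false,
        Bool.false_eq_true, if_false]
      rw [pvALoop_tf]
      simp only [pvFindAmazon, haz, if_true, List.drop_succ_cons, List.drop_zero]
      cases pvFindAmazon ls <;> rfl
    | false =>
      simp only [List.foldl_cons, pvAStep_eq, haz, Bool.false_or, Bool.and_self,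
        Bool.false_eq_true, if_false]
      rw [ih]
      simp only [pvFindAmazon, haz, Bool.false_eq_true, if_false]
      cases hp : pvFindAmazon ls with
      | none => rfl
      | some k =>
        simp only [Option.map_some, List.drop_succ_cons]

lemma pvF_join (ls : List String) (d : String) :
    pvF d ls = d ++ String.join (ls.map (· ++ "\n")) := by
  induction ls generalizing d with
  | nil => simp [pvF, String.join]
  | cons l t ih =>
    simp only [pvF, List.foldl_cons, List.map_cons] at *
    rw [ih, pvJoin_cons]
    simp [String.append_assoc]

-- A's whole inner per-index computation equals B's block tail
lemma pvALoop_eq_tail (links : List String) (d : String) :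
    pvALoop links d =
      d ++ String.join ((match pvFindAmazon links with
        | none => []
        | some first =>
          let rest := PySem.List.slice links (some ((first : Int) + 1)) none
          match pvFindAmazon rest with
          | none => []
          | some second => PySem.List.slice rest (some (second : Int)) none).map (· ++ "\n")) := by
  have hstep : (fun (st : Bool × Bool × String) l =>
      let s2 := if PySem.Str.startswith l "Amazon" && st.1 then true else st.2.1
      let f2 := if PySem.Str.startswith l "Amazon" then true else st.1
      let d2 := if f2 && s2 then st.2.2 ++ l ++ "\n" else st.2.2
      (f2, s2, d2)) = pvAStep := rfl
  unfold pvALoop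
  rw [hstep, pvALoop_ff]
  cases h1 : pvFindAmazon links with
  | none => simp [String.join]
  | some k =>
    have hc : ((k : Int) + 1) = ((k + 1 : Nat) : Int) := by push_cast; ring
    simp only [hc, PySem.List.slice_from_natCast]
    cases h2 : pvFindAmazon (links.drop (k + 1)) with
    | none => simp [String.join]
    | some j =>
      exact pvF_join _ d

def pvRowStep (html_titles : List String) (html_links : List (List String))
    (acc : Option String) (csv_row : List String) : Option String :=
  match acc with
  | none => none
  | some d =>
    match PySem.List.pyGet? csv_row 0 with
    | none => none
    | some csv_number_str =>
      if PySem.Str.strIsdigit csv_number_str then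
        match PySem.Int.ofStr? csv_number_str with
        | none => none
        | some n =>
          match PySem.List.pyGet? html_links (n - 1) with
          | none => none
          | some links =>
            if links.length > 0 then
              match PySem.List.pyGet? html_titles (n - 1) with
              | none => none
              | some title => some (pvALoop links (d ++ title ++ "\n") ++ "\n")
            else some d
      else some d

lemma pvRow_ok (html_titles : List String) (html_links : List (List String))
    (csv_row : List String) (d : String)
    (hne : csv_row ≠ [])
    (hdig : PySem.Str.strIsdigit (csv_row.headD "") = true →
      (PySem.Int.ofStr? (csv_row.headD "")).isSome = true ∧
      PySem.Raise.InRange html_links.length ((PySem.Int.ofStr? (csv_row.headD "")).getD 0 - 1) ∧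
      (PySem.List.pyGetD html_links ((PySem.Int.ofStr? (csv_row.headD "")).getD 0 - 1) [] ≠ [] →
        PySem.Raise.InRange html_titles.length ((PySem.Int.ofStr? (csv_row.headD "")).getD 0 - 1))) :
    pvRowStep html_titles html_links (some d) csv_row =
      some (d ++ (pvBlock html_titles html_links csv_row).getD "") := by
  obtain ⟨h, t, rfl⟩ : ∃ h t, csv_row = h :: t := by
    cases csv_row with
    | nil => exact absurd rfl hne
    | cons h t => exact ⟨h, t, rfl⟩
  simp only [List.headD_cons] at hdig
  have hget0 : PySem.List.pyGet? (h :: t) 0 = some h := PySem.List.pyGet?_zero_cons h t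
  unfold pvRowStep pvBlock
  rw [hget0]
  cases hdigb : PySem.Str.strIsdigit h with
  | false =>
    simp only [hdigb, Bool.false_eq_true, if_false, Option.getD_some, String.append_empty]
  | true =>
    obtain ⟨hsome, hlink, htitle⟩ := hdig hdigb
    obtain ⟨n, hn⟩ := Option.isSome_iff_exists.mp hsome
    simp only [hdigb, if_true, hn]
    rw [hn] at hlink htitle
    simp only [Option.getD_some] at hlink htitle
    obtain ⟨links, hlinks⟩ : ∃ links, PySem.List.pyGet? html_links (n - 1) = some links := by
      cases hg : PySem.List.pyGet? html_links (n - 1) with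
      | none => exact absurd hlink ((PySem.List.pyGet?_eq_none_iff _ _).mp hg)
      | some links => exact ⟨links, rfl⟩
    simp only [hlinks]
    have hlgd : PySem.List.pyGetD html_links (n - 1) [] = links := by
      simp [PySem.List.pyGetD, hlinks]
    rw [hlgd] at htitle
    by_cases hne2 : links = []
    · subst hne2
      simp
    · have hpos : links.length > 0 := List.length_pos_of_ne_nil hne2
      obtain ⟨title, htl⟩ : ∃ title, PySem.List.pyGet? html_titles (n - 1) = some title := by
        cases hg : PySem.List.pyGet? html_titles (n - 1) with
        | none => exact absurd (htitle hne2) ((PySem.List.pyGet?_eq_none_iff _ _).mp hg)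
        | some title => exact ⟨title, rfl⟩
      rw [if_pos hpos, if_neg hne2]
      simp only [htl]
      rw [pvALoop_eq_tail]
      simp only [Option.getD_some]
      congr 1
      simp only [pvJoin_append, pvJoin_cons]
      simp [String.join, String.append_assoc]

lemma pvFold_ok (html_titles : List String) (html_links : List (List String))
    (rows : List (List String)) (d : String)
    (hp : ∀ csv_row ∈ rows, csv_row ≠ [] ∧
      (PySem.Str.strIsdigit (csv_row.headD "") = true →
        (PySem.Int.ofStr? (csv_row.headD "")).isSome = true ∧
        PySem.Raise.InRange html_links.length ((PySem.Int.ofStr? (csv_row.headD "")).getD 0 - 1) ∧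
        (PySem.List.pyGetD html_links ((PySem.Int.ofStr? (csv_row.headD "")).getD 0 - 1) [] ≠ [] →
          PySem.Raise.InRange html_titles.length ((PySem.Int.ofStr? (csv_row.headD "")).getD 0 - 1)))) :
    rows.foldl (pvRowStep html_titles html_links) (some d) =
      some (d ++ String.join (rows.map (fun row => (pvBlock html_titles html_links row).getD ""))) := by
  induction rows generalizing d with
  | nil => simp [String.join]
  | cons r rs ih =>
    have hr := hp r (List.mem_cons_self ..)
    rw [List.foldl_cons, pvRow_ok html_titles html_links r d hr.1 hr.2,
      ih _ (fun row hm => hp row (List.mem_cons_of_mem _ hm))]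
    simp [pvJoin_cons, String.append_assoc]

-- ===== VERDICT (by name: the statement is the Claim_ definition above) =====
theorem create_en_description_spec : Claim_equal_create_en_description := by
  intro read_csv html_titles html_links _ hpre
  unfold Spec_create_en_description create_en_description create_en_description_alt
  have hstep : (fun (acc : Option String) csv_row =>
      match acc with
      | none => none
      | some d =>
        match PySem.List.pyGet? csv_row 0 with
        | none => none
        | some csv_number_str =>
          if PySem.Str.strIsdigit csv_number_str then
            match PySem.Int.ofStr? csv_number_str with
            | none => none
            | some n =>
              match PySem.List.pyGet? html_links (n - 1) with
              | none => none
              | some links =>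
                if links.length > 0 then
                  match PySem.List.pyGet? html_titles (n - 1) with
                  | none => none
                  | some title => some (pvALoop links (d ++ title ++ "\n") ++ "\n")
                else some d
          else some d) = pvRowStep html_titles html_links := rfl
  rw [hstep, pvFold_ok html_titles html_links read_csv _ hpre]
  rfl
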